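-- pv_equiv track=rewrite | github.com/jakapongh/iccs101 | homework/hw_04/sansprimes.py | sans_primes
-- ===== SOURCE A (Python) =====
-- def is_prime(n: int) -> bool:
--     if n < 2:
--         return False
--
--     result = True
--     for i in range(2, n):
--         if n % i == 0:
--             result = False
--
--     return result
--
-- def sans_primes(numbers: list[int]) -> list[int]:
--     new_list = []
--     i = 0
--     previous_is_prime = False
--
--     while i < len(numbers):
--         number = numbers[i]
--
--         if previous_is_prime:
--             previous_is_prime = is_prime(number)
--             i += 1
--             continue
--
--         if not is_prime(number):
--             new_list.append(number)
--
--         previous_is_prime = is_prime(number)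
--         i += 1
--
--     return new_list
-- ===== SOURCE B (Python) =====
-- def is_prime(n: int) -> bool:
--     # trial division only up to sqrt(n), with early exit
--     if n < 2:
--         return False
--     d = 2
--     while d * d <= n:
--         if n % d == 0:
--             return False
--         d += 1
--     return True
--
--
-- def sans_primes(numbers: list[int]) -> list[int]:
--     # mark-and-sweep over indices: mark every prime position, ban those
--     # positions and their successors, then keep the unbanned positions
--     prime_at = {i for i, x in enumerate(numbers) if is_prime(x)}
--     banned = prime_at | {i + 1 for i in prime_at}
--     return [x for i, x in enumerate(numbers) if i not in banned]
-- ===== Notes on version B (the rewrite author's own statement) =====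
-- stated objective: faster
-- what changed: Replaces A's stateful index loop (previous_is_prime state machine, is_prime recomputed up to twice per element with full trial division up to n) with a mark-and-sweep over an index set: primality is tested once per element by trial division only up to sqrt(n) with early exit, prime positions and their successors are collected into a banned set, and a final pass keeps the unbanned positions.
import Mathlib
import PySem

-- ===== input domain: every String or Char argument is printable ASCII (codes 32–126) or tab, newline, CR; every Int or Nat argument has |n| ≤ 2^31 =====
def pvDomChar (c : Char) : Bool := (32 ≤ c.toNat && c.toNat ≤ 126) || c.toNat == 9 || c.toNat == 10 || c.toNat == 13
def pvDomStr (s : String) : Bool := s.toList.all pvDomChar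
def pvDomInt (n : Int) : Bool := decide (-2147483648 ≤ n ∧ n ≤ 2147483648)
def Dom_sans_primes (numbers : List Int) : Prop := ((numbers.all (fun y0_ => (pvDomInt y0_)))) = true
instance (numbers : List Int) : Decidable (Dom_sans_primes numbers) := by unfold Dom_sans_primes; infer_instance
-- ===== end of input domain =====

-- B replaces A's stateful scan (full trial division up to n, recomputed per element) by a
-- sqrt-bounded early-exit primality test and an index mark-and-sweep (objective: faster).

-- ===== PORT A =====
-- A's is_prime: trial division over the whole range(2, n), no early exit
def pv_is_prime (n : Int) : Bool :=
  if n < 2 then false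
  else
    (PySem.List.pyRange 2 n 1).foldl
      (fun result i => if PySem.Int.mod n i == 0 then false else result) true

-- A's while-loop over indices = left fold over the list with state (new_list, previous_is_prime)
def sans_primes (numbers : List Int) : List Int :=
  (numbers.foldl
    (fun (st : List Int × Bool) number =>
      if st.2 then (st.1, pv_is_prime number)
      else if !(pv_is_prime number) then (st.1 ++ [number], pv_is_prime number)
      else (st.1, pv_is_prime number))
    ([], false)).1

-- ===== PORT B =====
-- B's while d*d <= n loop
def pv_trial (n : Int) (d : Int) : Bool :=
  if d * d ≤ n then
    if PySem.Int.mod n d == 0 then false else pv_trial n (d + 1)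
  else true
termination_by (n + 1 - d).toNat
decreasing_by
  have hds : d ≤ d * d := by rcases le_total d 0 with h | h <;> nlinarith
  omega

-- B's is_prime: trial division up to sqrt(n) with early exit
def pv_is_prime_alt (n : Int) : Bool :=
  if n < 2 then false else pv_trial n 2

def sans_primes_alt (numbers : List Int) : List Int :=
  let primeAt : PySem.Set Int :=
    PySem.Set.ofList
      (((PySem.List.enumerate numbers 0).filter (fun p => pv_is_prime_alt p.2)).map (fun p => p.1))
  let banned : PySem.Set Int :=
    PySem.Set.union primeAt (primeAt.map (fun i => i + 1))
  ((PySem.List.enumerate numbers 0).filter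
      (fun p => !(PySem.Set.contains banned p.1))).map (fun p => p.2)

-- ===== PRECONDITION & SPEC =====
def Spec_sans_primes (numbers : List Int) (out : List Int) : Prop := out = sans_primes_alt numbers
instance (numbers : List Int) (out : List Int) : Decidable (Spec_sans_primes numbers out) := by unfold Spec_sans_primes; infer_instance

-- ===== CLAIM (what is proved, stated in full; the proofs are below) =====
def Claim_equal_sans_primes : Prop := ∀ (numbers : List Int), Dom_sans_primes numbers → Spec_sans_primes numbers (sans_primes numbers)

-- ===== LEMMAS AND PROOFS =====

-- A's loop body as a named step function (definitionally equal to the lambda in sans_primes)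
def pvStep (f : Int → Bool) (st : List Int × Bool) (number : Int) : List Int × Bool :=
  if st.2 then (st.1, f number)
  else if !(f number) then (st.1 ++ [number], f number)
  else (st.1, f number)

-- reference recursion: element kept iff neither it nor its predecessor satisfies f
def pvChain (f : Int → Bool) : List Int → Bool → List Int
  | [], _ => []
  | x :: r, prev => (if !prev && !(f x) then [x] else []) ++ pvChain f r (f x)

theorem pv_foldl_chain (f : Int → Bool) (xs : List Int) :
    ∀ (acc : List Int) (prev : Bool),
    (xs.foldl (pvStep f) (acc, prev)).1 = acc ++ pvChain f xs prev := by
  induction xs with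
  | nil => intro acc prev; simp [pvChain]
  | cons x r ih =>
    intro acc prev
    rw [List.foldl_cons]
    have hstep : pvStep f (acc, prev) x
        = ((if !prev && !(f x) then acc ++ [x] else acc), f x) := by
      unfold pvStep
      by_cases hp : prev <;> by_cases hf : f x <;> simp [hp, hf]
    rw [hstep]
    by_cases hk : (!prev && !(f x)) = true <;>
      simp [pvChain, hk, ih, List.append_assoc]

theorem pvChain_congr (f g : Int → Bool) (h : ∀ x, f x = g x) :
    ∀ (xs : List Int) (prev : Bool), pvChain f xs prev = pvChain g xs prev := by
  intro xs
  induction xs with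
  | nil => intro prev; rfl
  | cons x r ih => intro prev; simp [pvChain, h, ih]

-- A's foldl flag: false sticks, so the result is "no i in l divides n"
theorem pv_foldl_flag (n : Int) (l : List Int) (b : Bool) :
    l.foldl (fun result i => if PySem.Int.mod n i == 0 then false else result) b
      = (b && l.all (fun i => !(PySem.Int.mod n i == 0))) := by
  induction l generalizing b with
  | nil => simp
  | cons i r ih =>
    simp only [List.foldl_cons, List.all_cons, ih]
    by_cases h : (PySem.Int.mod n i == 0) = true <;> simp [h]

theorem pv_trial_iff_aux (n : Int) :
    ∀ (k : Nat) (d : Int), (n + 1 - d).toNat ≤ k → 2 ≤ d →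
      (pv_trial n d = true ↔ ∀ e : Int, d ≤ e → e * e ≤ n → ¬ (e ∣ n)) := by
  intro k
  induction k with
  | zero =>
    intro d hk hd
    rw [pv_trial]
    have hnd : n + 1 ≤ d := by omega
    have hsq : ¬ (d * d ≤ n) := by nlinarith
    rw [if_neg hsq]
    constructor
    · intro _ e he hsq' _
      have : d * d ≤ e * e := by nlinarith
      omega
    · intro _; rfl
  | succ k ihk =>
    intro d hk hd
    rw [pv_trial]
    by_cases hsq : d * d ≤ n
    · have hdn : d ≤ n := by nlinarith
      by_cases hmod : (PySem.Int.mod n d == 0) = true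
      · rw [if_pos hsq, if_pos hmod]
        have hdvd : d ∣ n := (PySem.Int.mod_eq_zero_iff_dvd n d).mp (by simpa using hmod)
        constructor
        · intro h; exact absurd h (by simp)
        · intro h; exact absurd hdvd (h d le_rfl hsq)
      · have ih' := ihk (d + 1) (by omega) (by omega)
        rw [if_pos hsq, if_neg hmod, ih']
        constructor
        · intro h e he hsq'
          rcases eq_or_lt_of_le he with heq | hlt
          · subst heq
            intro hdvd
            exact hmod (by simpa using (PySem.Int.mod_eq_zero_iff_dvd n d).mpr hdvd)
          · exact h e (by omega) hsq'
        · intro h e he hsq'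
          exact h e (by omega) hsq'
    · rw [if_neg hsq]
      constructor
      · intro _ e he hsq' _
        have : d * d ≤ e * e := by nlinarith
        omega
      · intro _; rfl

theorem pv_trial_iff (n : Int) (d : Int) (hd : 2 ≤ d) :
    pv_trial n d = true ↔ ∀ e : Int, d ≤ e → e * e ≤ n → ¬ (e ∣ n) :=
  pv_trial_iff_aux n (n + 1 - d).toNat d le_rfl hd

theorem pv_is_prime_eq (n : Int) : pv_is_prime n = pv_is_prime_alt n := by
  unfold pv_is_prime pv_is_prime_alt
  by_cases hn : n < 2
  · simp [hn]
  · simp only [hn, if_false]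
    rw [not_lt] at hn
    rw [pv_foldl_flag, Bool.true_and]
    rw [Bool.eq_iff_iff, List.all_eq_true, pv_trial_iff n 2 le_rfl]
    constructor
    · intro h e he2 hsq hdvd
      have hen : e < n := by nlinarith
      have := h e (by rw [PySem.List.mem_pyRange_one]; exact ⟨he2, hen⟩)
      rw [Bool.not_eq_eq_eq_not, Bool.not_true, beq_eq_false_iff_ne] at this
      exact this ((PySem.Int.mod_eq_zero_iff_dvd n e).mpr hdvd)
    · intro h i hi
      rw [PySem.List.mem_pyRange_one] at hi
      obtain ⟨hi2, hin⟩ := hi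
      rw [Bool.not_eq_eq_eq_not, Bool.not_true, beq_eq_false_iff_ne]
      intro hmod
      have hdvd : i ∣ n := (PySem.Int.mod_eq_zero_iff_dvd n i).mp hmod
      obtain ⟨q, hq⟩ := hdvd
      have hq2 : 2 ≤ q := by nlinarith
      rcases le_total i q with hle | hle
      · exact h i hi2 (by nlinarith) ⟨q, hq⟩
      · exact h q hq2 (by nlinarith) ⟨i, by linarith [hq, mul_comm i q]⟩

-- the generalized sweep: filtering enumerate by a predicate that matches
-- "this element or its predecessor satisfies f" yields pvChain
theorem pv_sel_chain (f : Int → Bool) :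
    ∀ (xs : List Int) (s : Int) (P : Int → Bool) (prev : Bool),
    (∀ (j : Nat) (hj : j < xs.length),
        P (s + j) = (f xs[j] || (if j = 0 then prev else f xs[j - 1]))) →
    ((PySem.List.enumerate xs s).filter (fun p => !(P p.1))).map (fun p => p.2)
      = pvChain f xs prev := by
  intro xs
  induction xs with
  | nil => intro s P prev _; simp [PySem.List.enumerate_nil, pvChain]
  | cons x r ih =>
    intro s P prev hP
    rw [PySem.List.enumerate_cons]
    have h0 : P s = (f x || prev) := by
      have := hP 0 (by simp)
      simpa using this
    have hIH : ((PySem.List.enumerate r (s + 1)).filter (fun p => !(P p.1))).map (fun p => p.2)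
        = pvChain f r (f x) := by
      apply ih (s + 1) P (f x)
      intro j hj
      have := hP (j + 1) (by simpa using Nat.succ_lt_succ hj)
      rw [show s + ((j : Nat) + 1 : Nat) = s + 1 + (j : Nat) by push_cast; ring] at this
      rcases Nat.eq_zero_or_pos j with rfl | hjpos
      · simpa using this
      · obtain ⟨j', rfl⟩ : ∃ j', j = j' + 1 := ⟨j - 1, by omega⟩
        simp only [List.getElem_cons_succ, Nat.add_sub_cancel,
          if_neg (Nat.succ_ne_zero _)] at this ⊢
        exact this
    simp only [List.filter_cons, h0, pvChain]
    by_cases hx : (f x || prev) = true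
    · have : (! (f x || prev)) = false := by simp [hx]
      rw [this]
      simp only [Bool.false_eq_true, if_false]
      have : (!prev && !(f x)) = false := by
        rcases Bool.or_eq_true_iff.mp hx with h | h <;> simp [h]
      simp [this, hIH]
    · have hfp : f x = false ∧ prev = false := by
        simpa [Bool.or_eq_true_iff] using hx
      simp [hfp.1, hfp.2, hIH]

-- membership of a natural index j in B's banned set, in terms of f-flags
theorem pv_banned_char (f : Int → Bool) (xs : List Int) (j : Nat) (hj : j < xs.length) :
    (PySem.Set.contains
        (PySem.Set.union
          (PySem.Set.ofList (((PySem.List.enumerate xs 0).filter (fun p => f p.2)).map (fun p => p.1)))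
          ((PySem.Set.ofList (((PySem.List.enumerate xs 0).filter (fun p => f p.2)).map (fun p => p.1))).map (fun i => i + 1)))
        ((j : Int)))
      = (f xs[j] || (if j = 0 then false else f xs[j - 1])) := by
  have hmemPA : ∀ (z : Int),
      (z ∈ PySem.Set.ofList (((PySem.List.enumerate xs 0).filter (fun p => f p.2)).map (fun p => p.1)))
        ↔ (∃ (k : Nat), ∃ (hk : k < xs.length), f xs[k] = true ∧ z = (k : Int)) := by
    intro z
    rw [PySem.Set.mem_ofList, List.mem_map]
    constructor
    · rintro ⟨p, hp, hz⟩
      rw [List.mem_filter] at hp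
      obtain ⟨hpe, hpf⟩ := hp
      rw [PySem.List.mem_enumerate_iff] at hpe
      obtain ⟨k, hk, rfl⟩ := hpe
      refine ⟨k, hk, by simpa using hpf, by simpa using hz.symm⟩
    · rintro ⟨k, hk, hf, rfl⟩
      refine ⟨((k : Int), xs[k]), ?_, rfl⟩
      rw [List.mem_filter]
      constructor
      · rw [PySem.List.mem_enumerate_iff]; exact ⟨k, hk, by simp⟩
      · simpa using hf
  rw [Bool.eq_iff_iff, PySem.Set.contains_iff, PySem.Set.mem_union, List.mem_map]
  constructor
  · rintro (h | ⟨y, hy, hyj⟩)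
    · rw [hmemPA] at h
      obtain ⟨k, hk, hf, hkj⟩ := h
      have : k = j := by omega
      subst this
      simp [hf]
    · rw [hmemPA] at hy
      obtain ⟨k, hk, hf, rfl⟩ := hy
      have hj1 : j = k + 1 := by omega
      subst hj1
      have : ¬ (k + 1 = 0) := by omega
      simp [this, hf]
  · intro h
    rcases Bool.or_eq_true_iff.mp h with hf | hp
    · exact Or.inl ((hmemPA _).mpr ⟨j, hj, hf, rfl⟩)
    · right
      rcases Nat.eq_zero_or_pos j with rfl | hjpos
      · simp at hp
      · rw [if_neg (by omega)] at hp
        refine ⟨((j - 1 : Nat) : Int), (hmemPA _).mpr ⟨j - 1, by omega, hp, rfl⟩, by omega⟩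

-- ===== VERDICT (by name: the statement is the Claim_ definition above) =====
theorem sans_primes_spec : Claim_equal_sans_primes := by
  intro numbers _
  show sans_primes numbers = sans_primes_alt numbers
  show (numbers.foldl (pvStep pv_is_prime) ([], false)).1 = _
  rw [pv_foldl_chain, List.nil_append,
      pvChain_congr pv_is_prime pv_is_prime_alt pv_is_prime_eq]
  unfold sans_primes_alt
  rw [pv_sel_chain pv_is_prime_alt numbers 0
        (fun i => PySem.Set.contains
          (PySem.Set.union
            (PySem.Set.ofList (((PySem.List.enumerate numbers 0).filter (fun p => pv_is_prime_alt p.2)).map (fun p => p.1)))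
            ((PySem.Set.ofList (((PySem.List.enumerate numbers 0).filter (fun p => pv_is_prime_alt p.2)).map (fun p => p.1))).map (fun i => i + 1)))
          i)
        false]
  intro j hj
  simpa using pv_banned_char pv_is_prime_alt numbers j hj
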